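-- pv_equiv track=rewrite | github.com/RoboPlusPlus/Div-Python--JW | PyQt5 div/ObjectList_functions.py | clean_sheet_rows
-- ===== SOURCE A (Python) =====
-- def clean_sheet_rows(_sheet_rows):
--     _removed_rows = []
--     for row in reversed(range(len(_sheet_rows))):
--         for cell in range(2):
--             if "#" in _sheet_rows[row][cell]:
--                 _removed_rows.append(_sheet_rows[row])
--                 del _sheet_rows[row]
--                 break
--
--         for row in _sheet_rows:
--             for cell in row:
--                 cell = str(cell).replace(" ", "")
--                 cell = str(cell).replace(",", "")
--                 cell = str(cell).replace("\n", "")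
--                 cell = str(cell).replace("\t", "")
--
--     return _sheet_rows, _removed_rows
-- ===== SOURCE B (Python) =====
-- def clean_sheet_rows(_sheet_rows):
--     # Single forward pass partitioning rows; mutates _sheet_rows in place like A.
--     kept = []
--     removed = []
--     for row in _sheet_rows:
--         if "#" in row[0] or "#" in row[1]:
--             removed.append(row)
--         else:
--             kept.append(row)
--     removed.reverse()
--     _sheet_rows[:] = kept
--     return _sheet_rows, removed
-- ===== Notes on version B (the rewrite author's own statement) =====
-- stated objective: faster
-- what changed: Replaces A's reverse index walk with in-loop deletion (and its dead inner scrubbing loop) by one forward partition pass into kept/removed lists, reversing removed once at the end and writing kept back in place.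
import Mathlib
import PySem

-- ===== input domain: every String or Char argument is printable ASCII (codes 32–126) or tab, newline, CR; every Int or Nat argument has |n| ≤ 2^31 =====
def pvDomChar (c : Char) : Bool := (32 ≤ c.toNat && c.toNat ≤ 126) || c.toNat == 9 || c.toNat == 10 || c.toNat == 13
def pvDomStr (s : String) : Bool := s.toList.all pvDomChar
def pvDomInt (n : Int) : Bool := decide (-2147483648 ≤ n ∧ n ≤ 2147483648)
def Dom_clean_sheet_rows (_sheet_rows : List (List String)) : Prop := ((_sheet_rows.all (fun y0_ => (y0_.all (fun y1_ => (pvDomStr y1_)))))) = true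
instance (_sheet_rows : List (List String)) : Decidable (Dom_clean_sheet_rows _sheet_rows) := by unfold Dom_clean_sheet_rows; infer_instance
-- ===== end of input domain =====

-- B replaces A's reverse index walk with in-loop deletion (quadratic) by one forward
-- partition pass (objective: faster, measured). Both Pythons mutate
-- _sheet_rows in place (A: del, B: slice assignment); the equivalence proved here is
-- about the return value.

-- ===== PORT A =====
-- A walks indices len-1 .. 0; at each index it checks cells 0 and 1 in order (break on
-- the first '#' hit), appending the row to _removed_rows and deleting it from the list.
-- Python indexes _sheet_rows[row][cell] and raises IndexError on rows shorter than the
-- checked cell; Pre_ excludes exactly those inputs, so getD is exact inside Pre_.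
-- A's inner 'for row in _sheet_rows: for cell in row: cell = …' loop only rebinds local
-- variables and changes no state, so it contributes nothing to the port.
def cleanLoopA : Nat → List (List String) → List (List String) →
    List (List String) × List (List String)
  | 0, rows, removed => (rows, removed)
  | i + 1, rows, removed =>
      let row := rows.getD i []
      if PySem.Str.isIn "#" (row.getD 0 "") then
        cleanLoopA i (rows.eraseIdx i) (removed ++ [row])
      else if PySem.Str.isIn "#" (row.getD 1 "") then
        cleanLoopA i (rows.eraseIdx i) (removed ++ [row])
      else
        cleanLoopA i rows removed

def clean_sheet_rows (_sheet_rows : List (List String)) :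
    List (List String) × List (List String) :=
  cleanLoopA _sheet_rows.length _sheet_rows []

-- ===== PORT B =====
-- one forward pass appending each row to kept or removed; removed reversed at the end.
def cleanStepB (st : List (List String) × List (List String)) (row : List String) :
    List (List String) × List (List String) :=
  if PySem.Str.isIn "#" (row.getD 0 "") || PySem.Str.isIn "#" (row.getD 1 "") then
    (st.1, st.2 ++ [row])
  else
    (st.1 ++ [row], st.2)

def clean_sheet_rows_alt (_sheet_rows : List (List String)) :
    List (List String) × List (List String) :=
  let p := _sheet_rows.foldl cleanStepB ([], [])
  (p.1, p.2.reverse)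

-- ===== PRECONDITION & SPEC =====
-- Pre_ excludes exactly the inputs where Python A raises IndexError: a row with fewer
-- than two cells whose first cell (if any) has no '#'.
def Pre_clean_sheet_rows (_sheet_rows : List (List String)) : Prop :=
  ∀ row ∈ _sheet_rows,
    2 ≤ row.length ∨ (row.length = 1 ∧ PySem.Str.isIn "#" (row.getD 0 "") = true)
instance (_sheet_rows : List (List String)) : Decidable (Pre_clean_sheet_rows _sheet_rows) := by
  unfold Pre_clean_sheet_rows; infer_instance

def pvWitness_clean_sheet_rows : List (List String) :=
  [["a", "b"], ["#x"], ["c", "d#", "e"]]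

def Spec_clean_sheet_rows (_sheet_rows : List (List String)) (out : List (List String) × List (List String)) : Prop := out = clean_sheet_rows_alt _sheet_rows
instance (_sheet_rows : List (List String)) (out : List (List String) × List (List String)) : Decidable (Spec_clean_sheet_rows _sheet_rows out) := by unfold Spec_clean_sheet_rows; infer_instance

-- ===== CLAIM (what is proved, stated in full; the proofs are below) =====
def Claim_equal_clean_sheet_rows : Prop := ∀ (_sheet_rows : List (List String)), Dom_clean_sheet_rows _sheet_rows → Pre_clean_sheet_rows _sheet_rows → Spec_clean_sheet_rows _sheet_rows (clean_sheet_rows _sheet_rows)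

-- ===== LEMMAS AND PROOFS =====

-- the row predicate both ports test (A as two sequential ifs, B as one '||')
def pvBad (row : List String) : Bool :=
  PySem.Str.isIn "#" (row.getD 0 "") || PySem.Str.isIn "#" (row.getD 1 "")

theorem cleanLoopA_eq (i : Nat) :
    ∀ (rows removed : List (List String)), i ≤ rows.length →
      cleanLoopA i rows removed =
        ((rows.take i).filter (fun r => !pvBad r) ++ rows.drop i,
         removed ++ ((rows.take i).filter pvBad).reverse) := by
  induction i with
  | zero => intro rows removed _; simp [cleanLoopA]
  | succ i ih =>
    intro rows removed h
    have hi : i < rows.length := by omega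
    have hrow : rows.getD i [] = rows[i] := List.getD_eq_getElem rows [] hi
    have htake : rows.take (i + 1) = rows.take i ++ [rows[i]] :=
      List.take_succ_eq_append_getElem hi
    have herase : rows.eraseIdx i = rows.take i ++ rows.drop (i + 1) :=
      List.eraseIdx_eq_take_drop_succ rows i
    have hlen_take : (rows.take i).length = i := by simp; omega
    have htake_e : (rows.eraseIdx i).take i = rows.take i := by
      rw [herase]; exact List.take_left' hlen_take
    have hdrop_e : (rows.eraseIdx i).drop i = rows.drop (i + 1) := by
      rw [herase]; exact List.drop_left' hlen_take
    have hlen_e : i ≤ (rows.eraseIdx i).length := by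
      rw [List.length_eraseIdx_of_lt hi]; omega
    have hdrop : rows.drop i = rows[i] :: rows.drop (i + 1) :=
      List.drop_eq_getElem_cons hi
    have step : cleanLoopA (i + 1) rows removed =
        if pvBad rows[i] then cleanLoopA i (rows.eraseIdx i) (removed ++ [rows[i]])
        else cleanLoopA i rows removed := by
      simp only [cleanLoopA, hrow, pvBad]
      by_cases h0 : PySem.Chars.isIn ['#'] (rows[i][0]?.getD "").toList = true <;>
        by_cases h1 : PySem.Chars.isIn ['#'] (rows[i][1]?.getD "").toList = true <;>
          simp [h0, h1]
    rw [step]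
    by_cases hb : pvBad rows[i] = true
    · rw [if_pos hb, ih _ _ hlen_e, htake_e, hdrop_e]
      simp [htake, List.filter_append, hb, -List.take_append_getElem]
    · have hb' : pvBad rows[i] = false := by simpa using hb
      rw [if_neg (by simp [hb']), ih _ _ (by omega), hdrop]
      simp [htake, List.filter_append, hb', -List.take_append_getElem]

theorem foldl_cleanStepB (rows : List (List String)) :
    ∀ (k r : List (List String)),
      rows.foldl cleanStepB (k, r) =
        (k ++ rows.filter (fun row => !pvBad row), r ++ rows.filter pvBad) := by
  induction rows with
  | nil => intro k r; simp
  | cons row rows ih =>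
    intro k r
    by_cases hb : pvBad row = true
    · have : cleanStepB (k, r) row = (k, r ++ [row]) := by
        simp [cleanStepB, pvBad] at hb ⊢
        rcases hb with hb | hb <;> simp [hb]
      simp only [List.foldl_cons, this, ih, List.filter_cons, hb]
      simp
    · have hb' : pvBad row = false := by simpa using hb
      have : cleanStepB (k, r) row = (k ++ [row], r) := by
        simp [cleanStepB, pvBad] at hb' ⊢
        simp [hb'.1, hb'.2]
      simp only [List.foldl_cons, this, ih, List.filter_cons, hb']
      simp

-- ===== VERDICT (by name: the statement is the Claim_ definition above) =====
theorem clean_sheet_rows_spec : Claim_equal_clean_sheet_rows := by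
  intro rows _ _
  unfold Spec_clean_sheet_rows clean_sheet_rows clean_sheet_rows_alt
  rw [cleanLoopA_eq rows.length rows [] le_rfl, foldl_cleanStepB]
  simp
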